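-- pv_equiv track=rewrite | github.com/kittilsenstian-debug/the-hand | theory-tools/nuclear_shells.py | alg_score
-- ===== SOURCE A (Python) =====
-- EXACT = {
--     1: "unity",
--     2: "Z2/vacua",
--     3: "rep(SM)/triality",
--     4: "rank(A4)",
--     5: "rank(D5)",
--     6: "rank(E6)",
--     7: "rank(E7)",
--     8: "rank(E8)",
--     10: "rep(D5)/spinor",
--     12: "h(E6)",
--     14: "dim(G2)",
--     15: "dim(su(4))",
--     16: "rep(D5)_vector",
--     18: "h(E7)",
--     20: "roots(A4)",
--     21: "dim(so(7))",
--     24: "dim(A4)",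
--     26: "|sporadic|",
--     27: "dim(J3(O))/E6_fund",
--     28: "dim(so(8))/2.Ru",
--     30: "h(E8)",
--     33: "3*L(5)",
--     36: "dim(so(9))",
--     37: "J1",
--     40: "roots(D5)",
--     43: "J4",
--     45: "dim(D5)",
--     48: "240/5",
--     52: "dim(F4)",
--     54: "2*J3(O)",
--     56: "rep(E7)",
--     60: "240/4",
--     64: "4^3",
--     67: "O'N",
--     71: "Ly",
--     72: "roots(E6)",
--     78: "dim(E6)",
--     80: "hierarchy",
--     90: "roots(D5)_adj",
--     120: "roots(E8)/2",
--     126: "roots(E7)",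
--     128: "dim(half-spin SO(16))",
--     240: "roots(E8)",
--     248: "dim(E8)",
-- }
--
-- def alg_score(n):
--     """Return (score, type, source) for integer n."""
--     if n in EXACT:
--         return (3, "EXACT", EXACT[n])
--     for a in sorted(EXACT.keys()):
--         if a > 1 and n > a and n % a == 0:
--             b = n // a
--             if b in EXACT and b > 1:
--                 return (2, "PROD", f"{a}*{b}")
--     for a in sorted(EXACT.keys()):
--         b = n - a
--         if b > 0 and b in EXACT:
--             return (1, "SUM", f"{a}+{b}")
--     return (0, "MISS", "---")
-- ===== SOURCE B (Python) =====
-- EXACT = {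
--     1: "unity", 2: "Z2/vacua", 3: "rep(SM)/triality", 4: "rank(A4)", 5: "rank(D5)",
--     6: "rank(E6)", 7: "rank(E7)", 8: "rank(E8)", 10: "rep(D5)/spinor", 12: "h(E6)",
--     14: "dim(G2)", 15: "dim(su(4))", 16: "rep(D5)_vector", 18: "h(E7)", 20: "roots(A4)",
--     21: "dim(so(7))", 24: "dim(A4)", 26: "|sporadic|", 27: "dim(J3(O))/E6_fund",
--     28: "dim(so(8))/2.Ru", 30: "h(E8)", 33: "3*L(5)", 36: "dim(so(9))", 37: "J1",
--     40: "roots(D5)", 43: "J4", 45: "dim(D5)", 48: "240/5", 52: "dim(F4)", 54: "2*J3(O)",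
--     56: "rep(E7)", 60: "240/4", 64: "4^3", 67: "O'N", 71: "Ly", 72: "roots(E6)",
--     78: "dim(E6)", 80: "hierarchy", 90: "roots(D5)_adj", 120: "roots(E8)/2",
--     126: "roots(E7)", 128: "dim(half-spin SO(16))", 240: "roots(E8)", 248: "dim(E8)",
-- }
--
-- def alg_score(n):
--     """Return (score, type, source) for integer n."""
--     if n in EXACT:
--         return (3, "EXACT", EXACT[n])
--     keys = sorted(EXACT.keys())
--     for a in keys:
--         for b in keys:
--             if a > 1 and b > 1 and n > a and a * b == n:
--                 return (2, "PROD", f"{a}*{b}")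
--     for a in keys:
--         for b in keys:
--             if b > 0 and a + b == n:
--                 return (1, "SUM", f"{a}+{b}")
--     return (0, "MISS", "---")
-- ===== Notes on version B (the rewrite author's own statement) =====
-- stated objective: alternative
-- what changed: The PROD stage's divisor test (n % a == 0, then look up n // a) and the SUM stage's difference test (look up n - a) are replaced by nested double loops over the sorted key list that test a * b == n resp. a + b == n directly, with no division or subtraction-driven lookup.
import Mathlib
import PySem

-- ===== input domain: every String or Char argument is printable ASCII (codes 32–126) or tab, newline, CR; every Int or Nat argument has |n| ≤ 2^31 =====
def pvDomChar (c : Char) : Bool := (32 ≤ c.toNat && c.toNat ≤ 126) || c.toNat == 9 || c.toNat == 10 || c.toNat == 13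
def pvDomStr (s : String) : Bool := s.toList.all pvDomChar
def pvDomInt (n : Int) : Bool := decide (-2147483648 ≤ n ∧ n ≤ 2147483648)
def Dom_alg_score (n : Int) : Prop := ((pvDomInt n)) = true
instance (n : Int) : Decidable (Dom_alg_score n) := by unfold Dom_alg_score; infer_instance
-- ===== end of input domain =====

-- B replaces A's divisor/remainder single loops (n % a, n - a) with nested double loops
-- over the sorted key list, testing a*b == n resp. a + b == n directly (objective: alternative).

-- ===== PORT A =====
def EXACT : PySem.Dict Int String := PySem.Dict.ofList
  [(1, "unity"), (2, "Z2/vacua"), (3, "rep(SM)/triality"), (4, "rank(A4)"), (5, "rank(D5)"),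
   (6, "rank(E6)"), (7, "rank(E7)"), (8, "rank(E8)"), (10, "rep(D5)/spinor"), (12, "h(E6)"),
   (14, "dim(G2)"), (15, "dim(su(4))"), (16, "rep(D5)_vector"), (18, "h(E7)"), (20, "roots(A4)"),
   (21, "dim(so(7))"), (24, "dim(A4)"), (26, "|sporadic|"), (27, "dim(J3(O))/E6_fund"),
   (28, "dim(so(8))/2.Ru"), (30, "h(E8)"), (33, "3*L(5)"), (36, "dim(so(9))"), (37, "J1"),
   (40, "roots(D5)"), (43, "J4"), (45, "dim(D5)"), (48, "240/5"), (52, "dim(F4)"),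
   (54, "2*J3(O)"), (56, "rep(E7)"), (60, "240/4"), (64, "4^3"), (67, "O'N"), (71, "Ly"),
   (72, "roots(E6)"), (78, "dim(E6)"), (80, "hierarchy"), (90, "roots(D5)_adj"),
   (120, "roots(E8)/2"), (126, "roots(E7)"), (128, "dim(half-spin SO(16))"),
   (240, "roots(E8)"), (248, "dim(E8)")]

-- f"{a}*{b}" / f"{a}+{b}"
def pvProdStr (a b : Int) : String := PySem.Int.toStr a ++ "*" ++ PySem.Int.toStr b
def pvSumStr (a b : Int) : String := PySem.Int.toStr a ++ "+" ++ PySem.Int.toStr b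

-- A's first loop: single pass over sorted keys, divisor test then n//a lookup
def prodLoopA (n : Int) : List Int → Option String
  | [] => none
  | a :: rest =>
    if a > 1 ∧ n > a ∧ PySem.Int.mod n a = 0 then
      let b := PySem.Int.floordiv n a
      if EXACT.contains b = true ∧ b > 1 then some (pvProdStr a b) else prodLoopA n rest
    else prodLoopA n rest

-- A's second loop: single pass, b = n - a membership test
def sumLoopA (n : Int) : List Int → Option String
  | [] => none
  | a :: rest =>
    let b := n - a
    if b > 0 ∧ EXACT.contains b = true then some (pvSumStr a b) else sumLoopA n rest

def alg_score (n : Int) : Int × String × String :=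
  match EXACT.get? n with
  | some s => (3, "EXACT", s)
  | none =>
    match prodLoopA n (PySem.List.sorted (PySem.Dict.keys EXACT) id) with
    | some s => (2, "PROD", s)
    | none =>
      match sumLoopA n (PySem.List.sorted (PySem.Dict.keys EXACT) id) with
      | some s => (1, "SUM", s)
      | none => (0, "MISS", "---")

-- ===== PORT B =====
-- B's inner PROD loop over candidate b, for a fixed a
def innerProdB (n a : Int) : List Int → Option String
  | [] => none
  | b :: rest =>
    if a > 1 ∧ b > 1 ∧ n > a ∧ a * b = n then some (pvProdStr a b) else innerProdB n a rest

def outerProdB (n : Int) (keys : List Int) : List Int → Option String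
  | [] => none
  | a :: rest =>
    match innerProdB n a keys with
    | some s => some s
    | none => outerProdB n keys rest

-- B's inner SUM loop over candidate b, for a fixed a
def innerSumB (n a : Int) : List Int → Option String
  | [] => none
  | b :: rest =>
    if b > 0 ∧ a + b = n then some (pvSumStr a b) else innerSumB n a rest

def outerSumB (n : Int) (keys : List Int) : List Int → Option String
  | [] => none
  | a :: rest =>
    match innerSumB n a keys with
    | some s => some s
    | none => outerSumB n keys rest

def alg_score_alt (n : Int) : Int × String × String :=
  match EXACT.get? n with
  | some s => (3, "EXACT", s)
  | none =>
    let keys := PySem.List.sorted (PySem.Dict.keys EXACT) id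
    match outerProdB n keys keys with
    | some s => (2, "PROD", s)
    | none =>
      match outerSumB n keys keys with
      | some s => (1, "SUM", s)
      | none => (0, "MISS", "---")

-- ===== PRECONDITION & SPEC =====
def Spec_alg_score (n : Int) (out : Int × String × String) : Prop := out = alg_score_alt n
instance (n : Int) (out : Int × String × String) : Decidable (Spec_alg_score n out) := by unfold Spec_alg_score; infer_instance

-- ===== CLAIM (what is proved, stated in full; the proofs are below) =====
def Claim_equal_alg_score : Prop := ∀ (n : Int), Dom_alg_score n → Spec_alg_score n (alg_score n)

-- ===== LEMMAS AND PROOFS =====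

def keyList : List Int :=
  [1, 2, 3, 4, 5, 6, 7, 8, 10, 12, 14, 15, 16, 18, 20, 21, 24, 26, 27, 28, 30, 33,
   36, 37, 40, 43, 45, 48, 52, 54, 56, 60, 64, 67, 71, 72, 78, 80, 90, 120, 126, 128, 240, 248]

set_option maxRecDepth 8192 in
theorem sortedKeys_eq : PySem.List.sorted (PySem.Dict.keys EXACT) id = keyList := by decide

set_option maxRecDepth 8192 in
theorem keys_eq : PySem.Dict.keys EXACT = keyList := by decide

theorem contains_iff_mem_keyList (b : Int) : EXACT.contains b = true ↔ b ∈ keyList := by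
  rw [PySem.Dict.contains_iff_mem_keys, keys_eq]

-- B's inner PROD loop finds exactly the b = n // a that A checks
theorem innerProdB_eq (n a : Int) (l : List Int) :
    innerProdB n a l =
      if a > 1 ∧ n > a ∧ PySem.Int.mod n a = 0 ∧ PySem.Int.floordiv n a > 1 ∧
          PySem.Int.floordiv n a ∈ l
      then some (pvProdStr a (PySem.Int.floordiv n a)) else none := by
  induction l with
  | nil => simp [innerProdB]
  | cons b rest ih =>
    by_cases hc : a > 1 ∧ b > 1 ∧ n > a ∧ a * b = n
    · obtain ⟨ha, hb, hna, hab⟩ := hc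
      have ha0 : a ≠ 0 := by omega
      have hmod : PySem.Int.mod n a = 0 :=
        (PySem.Int.mod_eq_zero_iff_dvd n a).mpr ⟨b, hab.symm⟩
      have hdiv : PySem.Int.floordiv n a = b := by
        rw [PySem.Int.floordiv_eq_ediv_of_pos (by omega), ← hab,
          Int.mul_ediv_cancel_left _ ha0]
      rw [innerProdB, if_pos ⟨ha, hb, hna, hab⟩,
        if_pos ⟨ha, hna, hmod, by rw [hdiv]; exact hb, by rw [hdiv]; exact List.mem_cons_self⟩,
        hdiv]
    · rw [innerProdB, if_neg hc, ih]
      refine if_congr ?_ rfl rfl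
      constructor
      · rintro ⟨h1, h2, h3, h4, h5⟩
        exact ⟨h1, h2, h3, h4, List.mem_cons_of_mem _ h5⟩
      · rintro ⟨h1, h2, h3, h4, h5⟩
        rcases List.mem_cons.mp h5 with he | hm
        · exfalso
          apply hc
          obtain ⟨c, hc'⟩ := (PySem.Int.mod_eq_zero_iff_dvd n a).mp h3
          have hdiv : PySem.Int.floordiv n a = c := by
            rw [PySem.Int.floordiv_eq_ediv_of_pos (by omega), hc',
              Int.mul_ediv_cancel_left _ (by omega : a ≠ 0)]
          exact ⟨h1, by omega, h2, by rw [hc', ← hdiv, he]⟩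
        · exact ⟨h1, h2, h3, h4, hm⟩

-- B's inner SUM loop finds exactly the b = n - a that A checks
theorem innerSumB_eq (n a : Int) (l : List Int) :
    innerSumB n a l =
      if n - a > 0 ∧ (n - a) ∈ l then some (pvSumStr a (n - a)) else none := by
  induction l with
  | nil => simp [innerSumB]
  | cons b rest ih =>
    by_cases hc : b > 0 ∧ a + b = n
    · have hb : n - a = b := by omega
      rw [innerSumB, if_pos hc,
        if_pos ⟨by omega, by rw [hb]; exact List.mem_cons_self⟩, hb]
    · rw [innerSumB, if_neg hc, ih]
      refine if_congr ?_ rfl rfl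
      constructor
      · rintro ⟨h1, h2⟩
        exact ⟨h1, List.mem_cons_of_mem _ h2⟩
      · rintro ⟨h1, h2⟩
        rcases List.mem_cons.mp h2 with he | hm
        · exact absurd ⟨by omega, by omega⟩ hc
        · exact ⟨h1, hm⟩

theorem outerProdB_eq (n : Int) (l : List Int) :
    outerProdB n keyList l = prodLoopA n l := by
  induction l with
  | nil => rfl
  | cons a rest ih =>
    rw [outerProdB, innerProdB_eq, prodLoopA]
    by_cases h1 : a > 1 ∧ n > a ∧ PySem.Int.mod n a = 0
    · rw [if_pos h1]
      by_cases h2 : EXACT.contains (PySem.Int.floordiv n a) = true ∧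
          PySem.Int.floordiv n a > 1
      · rw [if_pos ⟨h1.1, h1.2.1, h1.2.2, h2.2, (contains_iff_mem_keyList _).mp h2.1⟩,
          if_pos h2]
      · rw [if_neg (fun h => h2 ⟨(contains_iff_mem_keyList _).mpr h.2.2.2.2, h.2.2.2.1⟩),
          if_neg h2]
        exact ih
    · rw [if_neg (fun h => h1 ⟨h.1, h.2.1, h.2.2.1⟩), if_neg h1]
      exact ih

theorem outerSumB_eq (n : Int) (l : List Int) :
    outerSumB n keyList l = sumLoopA n l := by
  induction l with
  | nil => rfl
  | cons a rest ih =>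
    rw [outerSumB, innerSumB_eq, sumLoopA]
    by_cases hc : n - a > 0 ∧ EXACT.contains (n - a) = true
    · rw [if_pos ⟨hc.1, (contains_iff_mem_keyList _).mp hc.2⟩, if_pos hc]
    · rw [if_neg (fun h => hc ⟨h.1, (contains_iff_mem_keyList _).mpr h.2⟩), if_neg hc]
      exact ih

-- ===== VERDICT (by name: the statement is the Claim_ definition above) =====
theorem alg_score_spec : Claim_equal_alg_score := by
  intro n _
  show alg_score n = alg_score_alt n
  unfold alg_score alg_score_alt
  simp only [sortedKeys_eq, outerProdB_eq, outerSumB_eq]
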